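-- pv_equiv track=rewrite | github.com/evelinamorim/crac25 | model.py | _union_find_clustering
-- ===== SOURCE A (Python) =====
-- from collections import defaultdict
--
-- def _union_find_clustering(antecedent_links, num_mentions):
--     """
--     Use Union-Find to build clusters from antecedent links
--
--     Args:
--         antecedent_links: dict mapping mention -> antecedent
--         num_mentions: total number of mentions
--
--     Returns:
--         clusters: List of clusters (each cluster is a list of mention indices)
--     """
--     # Initialize parent array for Union-Find
--     parent = list(range(num_mentions))
--
--     def find(x):
--         if parent[x] != x:
--             parent[x] = find(parent[x])
--         return parent[x]
--
--     def union(x, y):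
--         px, py = find(x), find(y)
--         if px != py:
--             parent[px] = py
--
--     # Union mentions based on antecedent links
--     for mention, antecedent in antecedent_links.items():
--         union(mention, antecedent)
--
--     # Group mentions by their root parent
--     clusters_dict = defaultdict(list)
--     for i in range(num_mentions):
--         root = find(i)
--         clusters_dict[root].append(i)
--
--     # Convert to list of clusters (filter out singleton clusters if desired)
--     clusters = [cluster for cluster in clusters_dict.values() if len(cluster) > 1]
--
--     return clusters
-- ===== SOURCE B (Python) =====
-- def _union_find_clustering(antecedent_links, num_mentions):
--     """Eager-relabeling ('quick-find') clustering: root[x] always holds the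
--     final representative, so no tree walking or recursion is ever needed."""
--     root = list(range(num_mentions))
--     members = [[i] for i in range(num_mentions)]
--     for mention, antecedent in antecedent_links.items():
--         rm = root[mention]
--         ra = root[antecedent]
--         if rm != ra:
--             for x in members[rm]:
--                 root[x] = ra
--             members[ra] += members[rm]
--             members[rm] = []
--     clusters = {}
--     for i in range(num_mentions):
--         clusters.setdefault(root[i], []).append(i)
--     return [c for c in clusters.values() if len(c) > 1]
-- ===== Notes on version B (the rewrite author's own statement) =====
-- stated objective: alternative
-- what changed: Replaced the recursive path-compressing union-find forest (parent pointers, recursive find with memoizing writes) by an eager-relabeling 'quick-find' scheme: a flat representative array plus per-representative member lists, so each link is processed by relabeling one class in place and no recursion or tree walking exists anywhere.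
import Mathlib
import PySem

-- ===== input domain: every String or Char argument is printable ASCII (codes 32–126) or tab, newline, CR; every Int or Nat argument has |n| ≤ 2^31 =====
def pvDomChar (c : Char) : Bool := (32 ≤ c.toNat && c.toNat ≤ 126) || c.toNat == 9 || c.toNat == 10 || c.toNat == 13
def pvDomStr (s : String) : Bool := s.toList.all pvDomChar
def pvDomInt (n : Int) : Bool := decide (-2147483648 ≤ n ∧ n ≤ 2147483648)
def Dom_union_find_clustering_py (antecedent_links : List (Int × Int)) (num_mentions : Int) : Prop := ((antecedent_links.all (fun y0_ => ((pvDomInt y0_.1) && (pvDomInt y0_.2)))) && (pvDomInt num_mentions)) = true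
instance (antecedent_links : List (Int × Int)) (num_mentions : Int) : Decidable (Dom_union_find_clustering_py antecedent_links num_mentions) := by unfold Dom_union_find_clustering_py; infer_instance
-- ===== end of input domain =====

-- B replaces A's recursive path-compressing union-find forest by eager relabeling
-- ("quick-find": a flat representative array plus per-representative member lists,
-- no recursion); objective: alternative (different algorithm, same exact output).

-- shared input decoding: the Python argument is a dict; the association list is
-- folded into an insertion-ordered dict (a later value for a duplicate key wins,
-- as in Python) and both programs iterate over its items.
def pvLinksItems (antecedent_links : List (Int × Int)) : List (Int × Int) :=
  (antecedent_links.foldl (fun (d : PySem.Dict Int Int) q => d.insert q.1 q.2) PySem.Dict.empty).items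

-- Python lists are ported as Array (O(1) indexing, like a Python list).
-- pvAGet/pvASet are Python's xs[i] / xs[i] = v EXACTLY for the in-range indices
-- -len(xs) <= i < len(xs) admitted by Pre_ (negative indices wrap, as in Python);
-- outside that range Python raises IndexError and those inputs are excluded.
def pvAGet {A : Type} (xs : Array A) (i : Int) (d : A) : A :=
  if i < 0 then xs.getD (i + xs.size).toNat d else xs.getD i.toNat d

def pvASet {A : Type} (xs : Array A) (i : Int) (v : A) : Array A :=
  if i < 0 then xs.setIfInBounds (i + xs.size).toNat v else xs.setIfInBounds i.toNat v

-- ===== PORT A =====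
-- def find(x): if parent[x] != x: parent[x] = find(parent[x]); return parent[x]
-- (fuel makes the recursion structural; fuel len(parent)+1 is proved sufficient
-- under Pre_; the fuel-0 fallback returns parent[x] and is never reached there)
def pvFindA : Nat → Array Int → Int → Array Int × Int
  | 0, p, x => (p, pvAGet p x 0)
  | f+1, p, x =>
      let v := pvAGet p x 0
      if v = x then (p, x)
      else
        let r := pvFindA f p v
        (pvASet r.1 x r.2, r.2)

-- def union(x, y): px, py = find(x), find(y); if px != py: parent[px] = py
def pvUnionA (p : Array Int) (x y : Int) : Array Int :=
  let f1 := pvFindA (p.size + 1) p x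
  let f2 := pvFindA (f1.1.size + 1) f1.1 y
  if f1.2 ≠ f2.2 then pvASet f2.1 f1.2 f2.2 else f2.1

-- clusters_dict = defaultdict(list) with keys in range(num_mentions) is ported as
-- an array of per-key buckets plus the list of keys in first-insertion order
-- (exact: every key is a root, hence lies in [0, num_mentions)); each bucket is
-- built front-to-back by cons and reversed when .values() is read off.
def union_find_clustering_py (antecedent_links : List (Int × Int)) (num_mentions : Int) : List (List Int) :=
  -- parent = list(range(num_mentions))
  let parent0 := (PySem.List.pyRange 0 num_mentions 1).toArray
  -- for mention, antecedent in antecedent_links.items(): union(mention, antecedent)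
  let parent1 := (pvLinksItems antecedent_links).foldl (fun p q => pvUnionA p q.1 q.2) parent0
  -- for i in range(num_mentions): clusters_dict[find(i)].append(i)
  let st := (PySem.List.pyRange 0 num_mentions 1).foldl
      (fun (st : Array Int × Array (List Int) × List Int) i =>
        let fr := pvFindA (st.1.size + 1) st.1 i
        let b := pvAGet st.2.1 fr.2 []
        (fr.1, pvASet st.2.1 fr.2 (i :: b), if b.isEmpty then fr.2 :: st.2.2 else st.2.2))
      (parent1, Array.replicate num_mentions.toNat ([] : List Int), ([] : List Int))
  -- [cluster for cluster in clusters_dict.values() if len(cluster) > 1]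
  ((st.2.2.reverse.map (fun r => (pvAGet st.2.1 r []).reverse)).filter (fun c => 1 < c.length))

-- ===== PORT B =====
-- (the member list of a representative is kept as an unordered bag: the merged
-- class is prepended, which changes only the internal, unobservable list order)
def union_find_clustering_py_alt (antecedent_links : List (Int × Int)) (num_mentions : Int) : List (List Int) :=
  -- root = list(range(num_mentions)); members = [[i] for i in range(num_mentions)]
  let root0 := (PySem.List.pyRange 0 num_mentions 1).toArray
  let members0 := ((PySem.List.pyRange 0 num_mentions 1).map (fun i => [i])).toArray
  -- for mention, antecedent in antecedent_links.items(): eager relabel of one class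
  let st := (pvLinksItems antecedent_links).foldl
      (fun (st : Array Int × Array (List Int)) q =>
        let rm := pvAGet st.1 q.1 0
        let ra := pvAGet st.1 q.2 0
        if rm ≠ ra then
          let mrm := pvAGet st.2 rm []
          (mrm.foldl (fun r x => pvASet r x ra) st.1,
           pvASet (pvASet st.2 ra (mrm ++ pvAGet st.2 ra [])) rm [])
        else st)
      (root0, members0)
  -- clusters = {}; for i in range(num_mentions): clusters.setdefault(root[i], []).append(i)
  let d := (PySem.List.pyRange 0 num_mentions 1).foldl
      (fun (d : Array (List Int) × List Int) i =>
        let r := pvAGet st.1 i 0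
        let b := pvAGet d.1 r []
        (pvASet d.1 r (i :: b), if b.isEmpty then r :: d.2 else d.2))
      (Array.replicate num_mentions.toNat ([] : List Int), ([] : List Int))
  -- [c for c in clusters.values() if len(c) > 1]
  ((d.2.reverse.map (fun r => (pvAGet d.1 r []).reverse)).filter (fun c => 1 < c.length))

-- ===== PRECONDITION & SPEC =====
-- Pre_ excludes exactly the inputs on which A raises IndexError: a link whose
-- mention or antecedent lies outside Python's list-index range [-num_mentions, num_mentions).
def Pre_union_find_clustering_py (antecedent_links : List (Int × Int)) (num_mentions : Int) : Prop :=
  ∀ q ∈ pvLinksItems antecedent_links,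
    -num_mentions ≤ q.1 ∧ q.1 < num_mentions ∧ -num_mentions ≤ q.2 ∧ q.2 < num_mentions
instance (antecedent_links : List (Int × Int)) (num_mentions : Int) : Decidable (Pre_union_find_clustering_py antecedent_links num_mentions) := by unfold Pre_union_find_clustering_py; infer_instance

def pvWitness_union_find_clustering_py : (List (Int × Int)) × Int := ([(0, 1), (2, 1), (4, 3)], 5)

def Spec_union_find_clustering_py (antecedent_links : List (Int × Int)) (num_mentions : Int) (out : List (List Int)) : Prop := out = union_find_clustering_py_alt antecedent_links num_mentions
instance (antecedent_links : List (Int × Int)) (num_mentions : Int) (out : List (List Int)) : Decidable (Spec_union_find_clustering_py antecedent_links num_mentions out) := by unfold Spec_union_find_clustering_py; infer_instance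

-- ===== CLAIM (what is proved, stated in full; the proofs are below) =====
def Claim_equal_union_find_clustering_py : Prop := ∀ (antecedent_links : List (Int × Int)) (num_mentions : Int), Dom_union_find_clustering_py antecedent_links num_mentions → Pre_union_find_clustering_py antecedent_links num_mentions → Spec_union_find_clustering_py antecedent_links num_mentions (union_find_clustering_py antecedent_links num_mentions)

-- ===== LEMMAS AND PROOFS =====

def pvCI (num : Int) (x : Int) : Int := if x < 0 then x + num else x

theorem pvAGetD_set {A : Type} (a : Array A) (i j : Nat) (v d : A) :
    (a.setIfInBounds i v).getD j d = if i = j ∧ i < a.size then v else a.getD j d := by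
  simp only [Array.getD_eq_getD_getElem?, Array.getElem?_setIfInBounds]
  by_cases hij : i = j
  · subst hij
    by_cases hi : i < a.size
    · simp [hi]
    · simp [hi]
  · simp [hij]

theorem pvAGetD_toArray {A : Type} (xs : List A) (j : Nat) (d : A) :
    (xs.toArray).getD j d = xs.getD j d := by
  simp only [Array.getD_eq_getD_getElem?, List.getElem?_toArray, List.getD_eq_getElem?_getD]

theorem pvAGet_of_nonneg {A : Type} (xs : Array A) {i : Int} (d : A) (h : 0 ≤ i) :
    pvAGet xs i d = xs.getD i.toNat d := by
  unfold pvAGet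
  rw [if_neg (by omega)]

theorem pvASet_of_nonneg {A : Type} (xs : Array A) {i : Int} (v : A) (h : 0 ≤ i) :
    pvASet xs i v = xs.setIfInBounds i.toNat v := by
  unfold pvASet
  rw [if_neg (by omega)]

theorem pvGet_bridge {A : Type} (xs : Array A) (num i : Int) (d : A) (hL : (xs.size : Int) = num)
    (h1 : -num ≤ i) (h2 : i < num) :
    pvAGet xs i d = xs.getD (pvCI num i).toNat d := by
  unfold pvAGet pvCI
  by_cases hi : i < 0
  · rw [if_pos hi, if_pos hi]
    congr 1
    omega
  · rw [if_neg hi, if_neg hi]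

theorem pvSet_bridge {A : Type} (xs : Array A) (num i : Int) (v : A) (hL : (xs.size : Int) = num)
    (h1 : -num ≤ i) (h2 : i < num) :
    pvASet xs i v = xs.setIfInBounds (pvCI num i).toNat v := by
  unfold pvASet pvCI
  by_cases hi : i < 0
  · rw [if_pos hi, if_pos hi]
    congr 1
    omega
  · rw [if_neg hi, if_neg hi]

theorem pvCI_bounds (num i : Int) (h1 : -num ≤ i) (h2 : i < num) :
    0 ≤ pvCI num i ∧ pvCI num i < num := by
  unfold pvCI; split <;> omega

def pvIroot : Nat → Array Int → Int → Int
  | 0, _, x => x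
  | f+1, p, x => let v := p.getD x.toNat 0; if v = x then x else pvIroot f p v

theorem pvIroot_succ (f : Nat) (p : Array Int) (x : Int) :
    pvIroot (f+1) p x = if p.getD x.toNat 0 = x then x else pvIroot f p (p.getD x.toNat 0) := rfl

def pvGood (n k : Nat) (P R : Array Int) : Prop :=
  P.size = n ∧ R.size = n ∧
  (∀ j < n, 0 ≤ P.getD j 0 ∧ P.getD j 0 < n) ∧
  (∀ j < n, 0 ≤ R.getD j 0 ∧ R.getD j 0 < n) ∧
  (∀ j < n, R.getD (P.getD j 0).toNat 0 = R.getD j 0) ∧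
  (∀ j < n, P.getD j 0 = (j : Int) → R.getD j 0 = (j : Int)) ∧
  (∀ j < n, R.getD (R.getD j 0).toNat 0 = R.getD j 0) ∧
  (∀ j < n, P.getD (R.getD j 0).toNat 0 = R.getD j 0) ∧
  (∀ j < n, pvIroot k P (j : Int) = R.getD j 0)

theorem pvIroot_fixed (p : Array Int) (z : Int) (h : p.getD z.toNat 0 = z) :
    ∀ f, pvIroot f p z = z := by
  intro f; induction f with
  | zero => rfl
  | succ g ih => rw [pvIroot_succ, if_pos h]

theorem pvIroot_stable (p : Array Int) (z : Int) (hz : p.getD z.toNat 0 = z) :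
    ∀ f y, pvIroot f p y = z → ∀ g, f ≤ g → pvIroot g p y = z := by
  intro f
  induction f with
  | zero =>
    intro y h g _
    simp only [pvIroot] at h
    subst h
    exact pvIroot_fixed p y hz g
  | succ f ih =>
    intro y h g hg
    obtain ⟨g', rfl⟩ : ∃ g', g = g' + 1 := ⟨g - 1, by omega⟩
    rw [pvIroot_succ] at h ⊢
    by_cases hv : p.getD y.toNat 0 = y
    · rw [if_pos hv] at h ⊢; exact h
    · rw [if_neg hv] at h ⊢
      exact ih _ h g' (by omega)

theorem pvIroot_set_root (n k : Nat) (P R : Array Int) (G : pvGood n k P R)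
    (c : Nat) (hc : c < n) :
    ∀ f (y : Nat), y < n → pvIroot f P (y : Int) = R.getD y 0 →
      pvIroot f (P.setIfInBounds c (R.getD c 0)) (y : Int) = R.getD y 0 := by
  obtain ⟨hPl, hRl, hPr, hRr, hW3, hW4, hW6, hW8, hW5⟩ := G
  intro f
  induction f with
  | zero => intro y hy h; simpa [pvIroot] using h
  | succ f ih =>
    intro y hy h
    have hyt : ((y : Int)).toNat = y := by simp
    have hget : ∀ j : Nat, (P.setIfInBounds c (R.getD c 0)).getD j 0
        = if c = j ∧ c < P.size then R.getD c 0 else P.getD j 0 := fun j => pvAGetD_set P c j _ 0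
    by_cases hcy : c = y
    · subst hcy
      have hP'c : (P.setIfInBounds c (R.getD c 0)).getD c 0 = R.getD c 0 := by
        rw [hget c, if_pos ⟨rfl, by omega⟩]
      rw [pvIroot_succ, hyt, hP'c]
      by_cases hfix : R.getD c 0 = (c : Int)
      · rw [if_pos hfix]; exact hfix.symm
      · rw [if_neg hfix]
        have hr := hRr c hc
        have hfix' : (P.setIfInBounds c (R.getD c 0)).getD (R.getD c 0).toNat 0 = R.getD c 0 := by
          rw [hget _, if_neg (by intro hh; exact hfix (by omega))]
          exact hW8 c hc
        exact pvIroot_fixed _ _ hfix' f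
    · have hP'y : (P.setIfInBounds c (R.getD c 0)).getD y 0 = P.getD y 0 := by
        rw [hget y, if_neg (by tauto)]
      rw [pvIroot_succ, hyt, hP'y]
      set v := P.getD y 0 with hv
      by_cases hvy : v = (y : Int)
      · rw [if_pos hvy]
        exact (hW4 y hy hvy).symm
      · rw [if_neg hvy]
        rw [pvIroot_succ, hyt, ← hv, if_neg hvy] at h
        have hv0 : 0 ≤ v := (hPr y hy).1
        have hvn : v.toNat < n := by have := (hPr y hy).2; omega
        have hcast : ((v.toNat : Nat) : Int) = v := Int.toNat_of_nonneg hv0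
        have h' : pvIroot f P ((v.toNat : Nat) : Int) = R.getD v.toNat 0 := by
          rw [hcast, h, ← hW3 y hy]
        have := ih v.toNat hvn h'
        rw [hcast] at this
        rw [this, hW3 y hy]

theorem pvGood_set_root (n k : Nat) (P R : Array Int) (G : pvGood n k P R)
    (c : Nat) (hc : c < n) : pvGood n k (P.setIfInBounds c (R.getD c 0)) R := by
  have G' := G
  obtain ⟨hPl, hRl, hPr, hRr, hW3, hW4, hW6, hW8, hW5⟩ := G'
  have hget : ∀ j : Nat, (P.setIfInBounds c (R.getD c 0)).getD j 0
      = if c = j ∧ c < P.size then R.getD c 0 else P.getD j 0 := fun j => pvAGetD_set P c j _ 0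
  have hcl : c < P.size := by omega
  refine ⟨by simp [hPl], hRl, ?_, hRr, ?_, ?_, hW6, ?_, ?_⟩
  · intro j hj
    rw [hget j]
    by_cases hcj : c = j
    · rw [if_pos ⟨hcj, hcl⟩]; exact hRr c hc
    · rw [if_neg (by tauto)]; exact hPr j hj
  · intro j hj
    rw [hget j]
    by_cases hcj : c = j
    · subst hcj
      rw [if_pos ⟨rfl, hcl⟩, hW6 c hc]
    · rw [if_neg (by tauto)]; exact hW3 j hj
  · intro j hj hPj
    by_cases hcj : c = j
    · subst hcj
      rw [hget c, if_pos ⟨rfl, hcl⟩] at hPj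
      exact hPj
    · rw [hget j, if_neg (by tauto)] at hPj
      exact hW4 j hj hPj
  · intro j hj
    rw [hget _]
    by_cases hcj : c = (R.getD j 0).toNat
    · rw [if_pos ⟨hcj, hcl⟩]
      -- R[c] = R[R[j]] = R[j]
      have := hW6 j hj
      rw [← hcj] at this
      exact this
    · rw [if_neg (by tauto)]
      exact hW8 j hj
  · intro j hj
    exact pvIroot_set_root n k P R G c hc k j hj (hW5 j hj)

theorem pvIroot_union (n k : Nat) (P R : Array Int) (G : pvGood n k P R)
    (px py : Nat) (hpx : px < n) (_hpy : py < n)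
    (hrpx : R.getD px 0 = (px : Int)) (hrpy : R.getD py 0 = (py : Int))
    (hppy : P.getD py 0 = (py : Int))
    (hne : px ≠ py) :
    ∀ f (y : Nat), y < n → pvIroot f P (y : Int) = R.getD y 0 →
      pvIroot (f+1) (P.setIfInBounds px (py : Int)) (y : Int) =
        (if R.getD y 0 = (px : Int) then (py : Int) else R.getD y 0) := by
  obtain ⟨hPl, hRl, hPr, hRr, hW3, hW4, hW6, hW8, hW5⟩ := G
  have hget : ∀ j : Nat, (P.setIfInBounds px (py : Int)).getD j 0
      = if px = j ∧ px < P.size then (py : Int) else P.getD j 0 := fun j => pvAGetD_set P px j _ 0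
  have hpxl : px < P.size := by omega
  intro f
  induction f with
  | zero =>
    intro y hy h
    simp only [pvIroot] at h
    -- y is its own representative; y ≠ px would follow unless y = px
    by_cases hypx : y = px
    · have hpyy : py ≠ y := by omega
      have hP'y : (P.setIfInBounds px (py : Int)).getD y 0 = (py : Int) := by
        rw [hget y, if_pos ⟨hypx.symm, hpxl⟩]
      rw [pvIroot_succ]
      simp only [Int.toNat_natCast, hP'y]
      rw [if_neg (by exact_mod_cast hpyy), if_pos (by rw [← h]; exact_mod_cast hypx)]
      have hfix : (P.setIfInBounds px (py : Int)).getD ((py : Int)).toNat 0 = (py : Int) := by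
        rw [hget _, if_neg (by simp; intro hh; omega)]
        simpa using hppy
      simpa using pvIroot_fixed _ _ hfix 0
    · have hP'y : (P.setIfInBounds px (py : Int)).getD y 0 = P.getD y 0 := by
        rw [hget y, if_neg (by tauto)]
      rw [pvIroot_succ]
      simp only [Int.toNat_natCast, hP'y]
      have hroot : P.getD y 0 = (y : Int) := by
        have h8 := hW8 y hy
        rw [← h] at h8
        simpa using h8
      rw [if_pos hroot, ← h, if_neg (by exact_mod_cast hypx)]
  | succ f ih =>
    intro y hy h
    by_cases hypx : y = px
    · have hpyy : py ≠ y := by omega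
      have hP'y : (P.setIfInBounds px (py : Int)).getD y 0 = (py : Int) := by
        rw [hget y, if_pos ⟨hypx.symm, hpxl⟩]
      rw [pvIroot_succ]
      simp only [Int.toNat_natCast, hP'y]
      rw [if_neg (by exact_mod_cast hpyy), if_pos (by rw [hypx]; exact hrpx)]
      have hfix : (P.setIfInBounds px (py : Int)).getD ((py : Int)).toNat 0 = (py : Int) := by
        rw [hget _, if_neg (by simp; intro hh; omega)]
        simpa using hppy
      exact pvIroot_fixed _ _ hfix (f+1)
    · have hP'y : (P.setIfInBounds px (py : Int)).getD y 0 = P.getD y 0 := by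
        rw [hget y, if_neg (by tauto)]
      rw [pvIroot_succ]
      simp only [Int.toNat_natCast, hP'y]
      set v := P.getD y 0 with hv
      by_cases hvy : v = (y : Int)
      · rw [if_pos hvy]
        have := hW4 y hy hvy
        rw [this, if_neg (by exact_mod_cast fun hh => hypx (by omega))]
      · rw [if_neg hvy]
        rw [pvIroot_succ] at h
        simp only [Int.toNat_natCast, ← hv] at h
        rw [if_neg hvy] at h
        have hv0 : 0 ≤ v := (hPr y hy).1
        have hvn : v.toNat < n := by have := (hPr y hy).2; omega
        have hcast : ((v.toNat : Nat) : Int) = v := Int.toNat_of_nonneg hv0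
        have h' : pvIroot f P ((v.toNat : Nat) : Int) = R.getD v.toNat 0 := by
          rw [hcast, h, ← hW3 y hy]
        have := ih v.toNat hvn h'
        rw [hcast] at this
        rw [this, hW3 y hy]

theorem pvGood_union (n k : Nat) (P R R' : Array Int) (G : pvGood n k P R)
    (px py : Nat) (hpx : px < n) (hpy : py < n)
    (hrpx : R.getD px 0 = (px : Int)) (hrpy : R.getD py 0 = (py : Int))
    (hppx : P.getD px 0 = (px : Int)) (hppy : P.getD py 0 = (py : Int))
    (hne : px ≠ py) (hR'len : R'.size = n)
    (hR' : ∀ j < n, R'.getD j 0 = (if R.getD j 0 = (px : Int) then (py : Int) else R.getD j 0)) :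
    pvGood n (k+1) (P.setIfInBounds px (py : Int)) R' := by
  have G' := G
  obtain ⟨hPl, hRl, hPr, hRr, hW3, hW4, hW6, hW8, hW5⟩ := G'
  have hget : ∀ j : Nat, (P.setIfInBounds px (py : Int)).getD j 0
      = if px = j ∧ px < P.size then (py : Int) else P.getD j 0 := fun j => pvAGetD_set P px j _ 0
  have hpxl : px < P.size := by omega
  -- value facts about R'
  have hR'v : ∀ j, j < n → (R'.getD j 0 = (py : Int) ∧ R.getD j 0 = (px : Int)) ∨
      (R'.getD j 0 = R.getD j 0 ∧ R.getD j 0 ≠ (px : Int)) := by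
    intro j hj
    rw [hR' j hj]
    by_cases hh : R.getD j 0 = (px : Int)
    · left; exact ⟨by rw [if_pos hh], hh⟩
    · right; exact ⟨by rw [if_neg hh], hh⟩
  refine ⟨by simp [hPl], hR'len, ?_, ?_, ?_, ?_, ?_, ?_, ?_⟩
  · intro j hj
    rw [hget j]
    by_cases hcj : px = j
    · rw [if_pos ⟨hcj, hpxl⟩]; constructor <;> omega
    · rw [if_neg (by tauto)]; exact hPr j hj
  · intro j hj
    rcases hR'v j hj with ⟨he, _⟩ | ⟨he, _⟩
    · rw [he]; constructor <;> omega
    · rw [he]; exact hRr j hj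
  · -- W3 for the new pair
    intro j hj
    rw [hget j]
    by_cases hcj : px = j
    · subst hcj
      rw [if_pos ⟨rfl, hpxl⟩]
      simp only [Int.toNat_natCast]
      rw [hR' py hpy, if_neg (by rw [hrpy]; exact_mod_cast fun hh => hne (by omega)), hrpy,
        hR' px hpx, if_pos hrpx]
    · rw [if_neg (by tauto)]
      have hv0 := (hPr j hj).1
      have hvn : (P.getD j 0).toNat < n := by have := (hPr j hj).2; omega
      rw [hR' _ hvn, hW3 j hj, hR' j hj]
  · -- W4
    intro j hj hPj
    by_cases hcj : px = j
    · subst hcj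
      rw [hget px, if_pos ⟨rfl, hpxl⟩] at hPj
      exact absurd (by exact_mod_cast hPj) (fun hh => hne (by omega))
    · rw [hget j, if_neg (by tauto)] at hPj
      have := hW4 j hj hPj
      rw [hR' j hj, if_neg (by rw [this]; exact_mod_cast fun hh => hcj (by omega)), this]
  · -- W6
    intro j hj
    rcases hR'v j hj with ⟨he, hr⟩ | ⟨he, hr⟩
    · rw [he]
      simp only [Int.toNat_natCast]
      rw [hR' py hpy, if_neg (by rw [hrpy]; exact_mod_cast fun hh => hne (by omega)), hrpy]
    · rw [he]
      have hv0 := (hRr j hj).1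
      have hvn : (R.getD j 0).toNat < n := by have := (hRr j hj).2; omega
      rw [hR' _ hvn, hW6 j hj, if_neg hr]
  · -- W8
    intro j hj
    rcases hR'v j hj with ⟨he, hr⟩ | ⟨he, hr⟩
    · rw [he]
      simp only [Int.toNat_natCast]
      rw [hget py, if_neg (by intro hh; exact hne (by omega))]
      exact hppy
    · rw [he]
      rw [hget _, if_neg ?hne8]
      · exact hW8 j hj
      · intro hh
        obtain ⟨hh1, _⟩ := hh
        have hv0 := (hRr j hj).1
        exact hr (by omega)
  · -- W5 with one extra unit of fuel
    intro j hj
    rw [hR' j hj]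
    exact pvIroot_union n k P R G px py hpx hpy hrpx hrpy hppy hne k j hj (hW5 j hj)

theorem pvFoldl_set (js : List Int) (v : Int) :
    ∀ (L : Array Int) (j : Nat), (∀ x ∈ js, 0 ≤ x) →
      ((js.foldl (fun r (x : Int) => r.setIfInBounds x.toNat v) L).getD j 0 =
        if ((j : Int) ∈ js ∧ j < L.size) then v else L.getD j 0) ∧
      (js.foldl (fun r (x : Int) => r.setIfInBounds x.toNat v) L).size = L.size := by
  induction js with
  | nil => intro L j _; simp
  | cons x t ih =>
    intro L j hpos
    have hx0 : 0 ≤ x := hpos x (by simp)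
    have ht : ∀ y ∈ t, 0 ≤ y := fun y hy => hpos y (by simp [hy])
    simp only [List.foldl_cons]
    obtain ⟨ihv, ihl⟩ := ih (L.setIfInBounds x.toNat v) j ht
    refine ⟨?_, by simpa using ihl⟩
    rw [ihv, pvAGetD_set]
    simp only [Array.size_setIfInBounds, List.mem_cons]
    by_cases hjt : (j : Int) ∈ t
    · by_cases hjl : j < L.size
      · rw [if_pos ⟨hjt, hjl⟩, if_pos ⟨Or.inr hjt, hjl⟩]
      · rw [if_neg (by tauto), if_neg (by intro hh; omega), if_neg (by tauto)]
    · rw [if_neg (by tauto)]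
      by_cases hjx : x.toNat = j ∧ x.toNat < L.size
      · rw [if_pos hjx, if_pos ⟨Or.inl (by omega), by omega⟩]
      · rw [if_neg hjx]
        by_cases hjm : (j:Int) = x ∧ j < L.size
        · exfalso; exact hjx ⟨by omega, by omega⟩
        · rw [if_neg (by tauto)]

def pvReps (n : Nat) (R : Array Int) : Nat :=
  ((Finset.range n).filter (fun j => R.getD j 0 = (j : Int))).card

theorem pvReps_relabel (n : Nat) (R R' : Array Int) (px py : Nat) (hpx : px < n)
    (hrpx : R.getD px 0 = (px : Int)) (hrpy : R.getD py 0 = (py : Int)) (hne : px ≠ py)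
    (hR' : ∀ j < n, R'.getD j 0 = (if R.getD j 0 = (px : Int) then (py : Int) else R.getD j 0)) :
    pvReps n R' + 1 = pvReps n R := by
  have hset : (Finset.range n).filter (fun j => R'.getD j 0 = (j : Int)) =
      ((Finset.range n).filter (fun j => R.getD j 0 = (j : Int))).erase px := by
    ext j
    simp only [Finset.mem_erase, Finset.mem_filter, Finset.mem_range]
    constructor
    · rintro ⟨hj, he⟩
      rw [hR' j hj] at he
      by_cases hh : R.getD j 0 = (px : Int)
      · rw [if_pos hh] at he
        have : j = py := by omega
        subst this
        rw [hrpy] at hh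
        exfalso; exact hne (by omega)
      · rw [if_neg hh] at he
        refine ⟨by rintro rfl; exact hh hrpx, hj, he⟩
    · rintro ⟨hjpx, hj, he⟩
      refine ⟨hj, ?_⟩
      rw [hR' j hj, if_neg (by rw [he]; exact_mod_cast hjpx), he]
  have hmem : px ∈ (Finset.range n).filter (fun j => R.getD j 0 = (j : Int)) := by
    simp only [Finset.mem_filter, Finset.mem_range]
    exact ⟨hpx, hrpx⟩
  unfold pvReps
  rw [hset, Finset.card_erase_of_mem hmem]
  have : 1 ≤ ((Finset.range n).filter (fun j => R.getD j 0 = (j : Int))).card :=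
    Finset.card_pos.mpr ⟨px, hmem⟩
  omega

theorem pvFindA_succ (f : Nat) (p : Array Int) (x : Int) :
    pvFindA (f+1) p x =
      (if pvAGet p x 0 = x then (p, x)
       else (pvASet (pvFindA f p (pvAGet p x 0)).1 x
              (pvFindA f p (pvAGet p x 0)).2,
             (pvFindA f p (pvAGet p x 0)).2)) := rfl

theorem pvFindA_spec (num : Int) (n k : Nat) (hnum : (n : Int) = num) :
    ∀ f (P R : Array Int) (x : Int), pvGood n k P R → -num ≤ x → x < num →
      pvIroot f P (pvCI num x) = R.getD (pvCI num x).toNat 0 →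
      (pvFindA (f+1) P x).2 = R.getD (pvCI num x).toNat 0 ∧
      pvGood n k (pvFindA (f+1) P x).1 R := by
  intro f
  induction f with
  | zero =>
    intro P R x G h1 h2 h
    obtain ⟨hPl, hRl, hPr, hRr, hW3, hW4, hW6, hW8, hW5⟩ := G
    have hLi : (P.size : Int) = num := by rw [hPl, hnum]
    obtain ⟨hc0, hcn⟩ := pvCI_bounds num x h1 h2
    have hcN : (pvCI num x).toNat < n := by omega
    have hv : pvAGet P x 0 = P.getD (pvCI num x).toNat 0 := pvGet_bridge P num x 0 hLi h1 h2
    simp only [pvIroot] at h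
    have hPc : P.getD (pvCI num x).toNat 0 = pvCI num x := by
      have h8 := hW8 (pvCI num x).toNat hcN
      rw [← h] at h8
      exact h8
    rw [pvFindA_succ]
    by_cases hvx : pvAGet P x 0 = x
    · rw [if_pos hvx]
      have hxc : x = pvCI num x := hvx.symm.trans (hv.trans hPc)
      exact ⟨hxc.trans h, ⟨hPl, hRl, hPr, hRr, hW3, hW4, hW6, hW8, hW5⟩⟩
    · rw [if_neg hvx]
      have hvc : pvAGet P x 0 = pvCI num x := by rw [hv, hPc]
      have hvout : (pvFindA 0 P (pvAGet P x 0)).2 = pvCI num x := by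
        simp only [pvFindA]
        rw [hvc, pvGet_bridge P num _ 0 hLi (by omega) (by omega)]
        have hci : pvCI num (pvCI num x) = pvCI num x := by unfold pvCI; rw [if_neg (by omega)]
        rw [hci, hPc]
      have hvp : (pvFindA 0 P (pvAGet P x 0)).1 = P := by simp only [pvFindA]
      rw [hvp, hvout]
      constructor
      · exact h
      · rw [pvSet_bridge P num x _ hLi h1 h2]
        have hgsr := pvGood_set_root n k P R ⟨hPl, hRl, hPr, hRr, hW3, hW4, hW6, hW8, hW5⟩ _ hcN
        rw [← h] at hgsr
        exact hgsr
  | succ f ih =>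
    intro P R x G h1 h2 h
    obtain ⟨hPl, hRl, hPr, hRr, hW3, hW4, hW6, hW8, hW5⟩ := G
    have hLi : (P.size : Int) = num := by rw [hPl, hnum]
    obtain ⟨hc0, hcn⟩ := pvCI_bounds num x h1 h2
    have hcN : (pvCI num x).toNat < n := by omega
    have hv : pvAGet P x 0 = P.getD (pvCI num x).toNat 0 := pvGet_bridge P num x 0 hLi h1 h2
    rw [pvFindA_succ]
    by_cases hvx : pvAGet P x 0 = x
    · rw [if_pos hvx]
      have hx0 : 0 ≤ x := by
        have := (hPr (pvCI num x).toNat hcN).1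
        rw [← hv] at this
        omega
      have hcx : pvCI num x = x := by unfold pvCI; rw [if_neg (by omega)]
      refine ⟨?_, ⟨hPl, hRl, hPr, hRr, hW3, hW4, hW6, hW8, hW5⟩⟩
      have hxeq : P.getD x.toNat 0 = x := by
        rw [hcx] at hv
        rw [← hv]
        exact hvx
      have hw4 := hW4 x.toNat (by omega : x.toNat < n)
      rw [Int.toNat_of_nonneg hx0] at hw4
      rw [hcx]
      exact (hw4 hxeq).symm
    · rw [if_neg hvx]
      set v := pvAGet P x 0 with hvdef
      have hv0 : 0 ≤ v := by rw [hv]; exact (hPr _ hcN).1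
      have hvn : v < num := by
        rw [hv]
        have := (hPr _ hcN).2
        omega
      have hcv : pvCI num v = v := by unfold pvCI; rw [if_neg (by omega)]
      have hWv : R.getD v.toNat 0 = R.getD (pvCI num x).toNat 0 := by
        rw [hv]
        exact hW3 (pvCI num x).toNat hcN
      have hpre : pvIroot f P (pvCI num v) = R.getD (pvCI num v).toNat 0 := by
        rw [hcv]
        by_cases hvc : v = pvCI num x
        · have hPc : P.getD (pvCI num x).toNat 0 = pvCI num x := by rw [← hv, hvc]
          have hPc' : P.getD v.toNat 0 = v := by rw [hvc]; exact hPc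
          rw [pvIroot_fixed P v hPc' f, hWv, ← h, pvIroot_fixed P (pvCI num x) hPc (f+1), hvc]
        · rw [pvIroot_succ] at h
          rw [if_neg (by rw [← hv]; exact fun hh => hvc (by rw [hh]))] at h
          rw [← hv] at h
          rw [h, hWv]
      have hrec := ih P R v ⟨hPl, hRl, hPr, hRr, hW3, hW4, hW6, hW8, hW5⟩ (by omega) hvn hpre
      obtain ⟨hout, hG'⟩ := hrec
      rw [hcv] at hout
      have hL2 : ((pvFindA (f+1) P v).1.size : Int) = num := by
        obtain ⟨hl, _⟩ := hG'
        rw [hl, hnum]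
      constructor
      · rw [hout, hWv]
      · rw [pvSet_bridge _ num x _ hL2 h1 h2, hout, hWv]
        exact pvGood_set_root n k _ R hG' _ hcN

def pvBStep (R : Array Int) (M : Array (List Int)) (m a : Int) : Array Int × Array (List Int) :=
  let rm := pvAGet R m 0
  let ra := pvAGet R a 0
  if rm ≠ ra then
    let mrm := pvAGet M rm []
    (mrm.foldl (fun r x => pvASet r x ra) R,
     pvASet (pvASet M ra (mrm ++ pvAGet M ra [])) rm [])
  else (R, M)

def pvInv (n k : Nat) (P R : Array Int) (M : Array (List Int)) : Prop :=
  pvGood n k P R ∧ M.size = n ∧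
  (∀ r < n, ∀ x : Int, x ∈ M.getD r [] ↔ ∃ j : Nat, j < n ∧ x = (j : Int) ∧ R.getD j 0 = (r : Int)) ∧
  k + pvReps n R ≤ n

theorem pvStep_spec (num : Int) (n : Nat) (hnum : (n : Int) = num)
    (P R : Array Int) (M : Array (List Int)) (k : Nat) (I : pvInv n k P R M)
    (m a : Int) (h1 : -num ≤ m) (h2 : m < num) (h3 : -num ≤ a) (h4 : a < num) :
    ∃ k', pvInv n k' (pvUnionA P m a) (pvBStep R M m a).1 (pvBStep R M m a).2 := by
  obtain ⟨G, hMl, hW7, hcnt⟩ := I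
  have G0 := G
  obtain ⟨hPl, hRl, hPr, hRr, hW3, hW4, hW6, hW8, hW5⟩ := G0
  have hkn : k ≤ n := by omega
  have hRLi : (R.size : Int) = num := by rw [hRl, hnum]
  have hMLi : (M.size : Int) = num := by rw [hMl, hnum]
  obtain ⟨hcm0, hcmn⟩ := pvCI_bounds num m h1 h2
  obtain ⟨hca0, hcan⟩ := pvCI_bounds num a h3 h4
  have hcmN : (pvCI num m).toNat < n := by omega
  have hcaN : (pvCI num a).toNat < n := by omega
  -- lift the chain bound from fuel k to fuel n (for any parent satisfying pvGood)
  have hlift : ∀ (Q : Array Int), pvGood n k Q R → ∀ c : Nat, c < n →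
      pvIroot n Q (c : Int) = R.getD c 0 := by
    intro Q GQ c hc
    obtain ⟨_, _, _, _, _, _, _, q8, q5⟩ := GQ
    exact pvIroot_stable Q (R.getD c 0) (q8 c hc) k (c : Int) (q5 c hc) n hkn
  -- A's first find
  have hfuel1 : P.size + 1 = n + 1 := by rw [hPl]
  have hpre1 : pvIroot n P (pvCI num m) = R.getD (pvCI num m).toNat 0 := by
    have := hlift P G (pvCI num m).toNat hcmN
    rwa [Int.toNat_of_nonneg hcm0] at this
  have hf1 := pvFindA_spec num n k hnum n P R m G h1 h2 hpre1
  obtain ⟨hf1v, hf1G⟩ := hf1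
  -- A's second find
  have hfuel2 : (pvFindA (n+1) P m).1.size + 1 = n + 1 := by rw [hf1G.1]
  have hpre2 : pvIroot n (pvFindA (n+1) P m).1 (pvCI num a) = R.getD (pvCI num a).toNat 0 := by
    have := hlift _ hf1G (pvCI num a).toNat hcaN
    rwa [Int.toNat_of_nonneg hca0] at this
  have hf2 := pvFindA_spec num n k hnum n (pvFindA (n+1) P m).1 R a hf1G h3 h4 hpre2
  obtain ⟨hf2v, hf2G⟩ := hf2
  -- B's two reads agree with the two find results
  have hrm : pvAGet R m 0 = R.getD (pvCI num m).toNat 0 := pvGet_bridge R num m 0 hRLi h1 h2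
  have hra : pvAGet R a 0 = R.getD (pvCI num a).toNat 0 := pvGet_bridge R num a 0 hRLi h3 h4
  set rm := R.getD (pvCI num m).toNat 0 with hrmdef
  set ra := R.getD (pvCI num a).toNat 0 with hradef
  have hunfA : pvUnionA P m a =
      (if (pvFindA (n+1) P m).2 ≠ (pvFindA ((pvFindA (n+1) P m).1.size + 1) (pvFindA (n+1) P m).1 a).2
       then pvASet (pvFindA ((pvFindA (n+1) P m).1.size + 1) (pvFindA (n+1) P m).1 a).1
              (pvFindA (n+1) P m).2
              (pvFindA ((pvFindA (n+1) P m).1.size + 1) (pvFindA (n+1) P m).1 a).2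
       else (pvFindA ((pvFindA (n+1) P m).1.size + 1) (pvFindA (n+1) P m).1 a).1) := by
    rw [pvUnionA, hfuel1]
  rw [hunfA, hfuel2]
  rw [pvBStep]
  simp only [hrm, hra, hf1v, hf2v]
  by_cases heq : rm = ra
  · rw [if_neg (by simpa using heq), if_neg (by simpa using heq)]
    exact ⟨k, hf2G, hMl, hW7, hcnt⟩
  · rw [if_pos (by simpa using heq), if_pos (by simpa using heq)]
    -- representative facts
    have hrm0 : 0 ≤ rm := (hRr _ hcmN).1
    have hrmn : rm < n := (hRr _ hcmN).2
    have hra0 : 0 ≤ ra := (hRr _ hcaN).1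
    have hran : ra < n := (hRr _ hcaN).2
    set px := rm.toNat with hpxdef
    set py := ra.toNat with hpydef
    have hpxn : px < n := by omega
    have hpyn : py < n := by omega
    have hpxc : ((px : Nat) : Int) = rm := Int.toNat_of_nonneg hrm0
    have hpyc : ((py : Nat) : Int) = ra := Int.toNat_of_nonneg hra0
    have hne' : px ≠ py := by omega
    have hRpx : R.getD px 0 = (px : Int) := by rw [hpxc]; exact hW6 _ hcmN
    have hRpy : R.getD py 0 = (py : Int) := by rw [hpyc]; exact hW6 _ hcaN
    refine ⟨k + 1, ?_⟩
    set P2 := (pvFindA (n+1) (pvFindA (n+1) P m).1 a).1 with hP2def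
    obtain ⟨hP2l, _, hP2r, _, hP2W3, hP2W4, _, hP2W8, hP2W5⟩ := hf2G
    have hrmlt : rm < num := by omega
    have hralt : ra < num := by omega
    -- normalize the python reads/writes on canonical (nonnegative) indices
    have hMrm : pvAGet M rm [] = M.getD px [] := by
      rw [pvAGet_of_nonneg M [] hrm0, hpxdef]
    have hMra : pvAGet M ra [] = M.getD py [] := by
      rw [pvAGet_of_nonneg M [] hra0, hpydef]
    set mrm := M.getD px [] with hmrmdef
    have hmem : ∀ x : Int, x ∈ mrm ↔ ∃ j : Nat, j < n ∧ x = (j : Int) ∧ R.getD j 0 = (px : Int) := by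
      intro x
      rw [hmrmdef]
      exact hW7 px hpxn x
    have hmem0 : ∀ x ∈ mrm, (0 : Int) ≤ x := by
      intro x hx
      obtain ⟨j, _, rfl, _⟩ := (hmem x).mp hx
      positivity
    -- the relabel fold in canonical form
    have hfold : List.foldl (fun r x => pvASet r x ra) R mrm =
        List.foldl (fun r (x : Int) => r.setIfInBounds x.toNat ra) R mrm := by
      exact PySem.List.foldl_congr_mem mrm _ _ R
        (fun acc x hx => pvASet_of_nonneg acc ra (hmem0 x hx))
    have hrootlen : (List.foldl (fun r x => pvASet r x ra) R mrm).size = n := by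
      rw [hfold, (pvFoldl_set mrm ra R 0 hmem0).2, hRl]
    have hrootget : ∀ j, j < n → (List.foldl (fun r x => pvASet r x ra) R mrm).getD j 0 =
        (if R.getD j 0 = (px : Int) then (py : Int) else R.getD j 0) := by
      intro j hj
      rw [hfold, (pvFoldl_set mrm ra R j hmem0).1]
      by_cases hRj : R.getD j 0 = (px : Int)
      · rw [if_pos hRj, if_pos ⟨(hmem _).mpr ⟨j, hj, rfl, hRj⟩, by omega⟩, hpyc]
      · rw [if_neg hRj, if_neg ?side]
        case side =>
          rintro ⟨hin, -⟩
          obtain ⟨j', _, hjj', hRj'⟩ := (hmem _).mp hin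
          have : j = j' := by omega
          subst this
          exact hRj hRj'
    -- A's union write
    have hwrite : pvASet P2 rm ra = P2.setIfInBounds px ((py : Nat) : Int) := by
      rw [pvASet_of_nonneg P2 ra hrm0, hpxdef, hpyc]
    have hPpx : P2.getD px 0 = (px : Int) := by
      have := hP2W8 (pvCI num m).toNat hcmN
      rwa [← hrmdef, ← hpxdef, ← hpxc] at this
    have hPpy : P2.getD py 0 = (py : Int) := by
      have := hP2W8 (pvCI num a).toNat hcaN
      rwa [← hradef, ← hpydef, ← hpyc] at this
    have hGood' : pvGood n (k+1) (P2.setIfInBounds px ((py : Nat) : Int))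
        (List.foldl (fun r x => pvASet r x ra) R mrm) :=
      pvGood_union n k P2 R _ ⟨hP2l, hRl, hP2r, hRr, hP2W3, hP2W4, hW6, hP2W8, hP2W5⟩
        px py hpxn hpyn hRpx hRpy hPpx hPpy hne' hrootlen hrootget
    -- B's member-list update
    have hMwr : pvASet (pvASet M ra (mrm ++ pvAGet M ra [])) rm [] =
        (M.setIfInBounds py (mrm ++ M.getD py [])).setIfInBounds px [] := by
      rw [hMra, pvASet_of_nonneg M _ hra0, hpydef,
        pvASet_of_nonneg _ _ hrm0, hpxdef]
    simp only [hMrm]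
    refine ⟨?_, ?_, ?_, ?_⟩
    · rw [hwrite]
      exact hGood'
    · simp only [hMwr, Array.size_setIfInBounds, hMl]
    · intro r hr x
      rw [hMwr]
      have hlen1 : (M.setIfInBounds py (mrm ++ M.getD py [])).size = M.size := by simp
      rw [pvAGetD_set, hlen1, pvAGetD_set]
      by_cases hrpx : px = r
      · rw [if_pos ⟨hrpx, by omega⟩]
        simp only [List.not_mem_nil, false_iff]
        rintro ⟨j, hj, rfl, hrj⟩
        rw [hrootget j hj] at hrj
        by_cases hRj : R.getD j 0 = (px : Int)
        · rw [if_pos hRj] at hrj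
          rw [← hrpx] at hrj
          exact hne' (by omega)
        · rw [if_neg hRj] at hrj
          rw [← hrpx] at hrj
          exact hRj hrj
      · rw [if_neg (by tauto)]
        by_cases hrpy : py = r
        · rw [if_pos ⟨hrpy, by omega⟩, List.mem_append]
          constructor
          · rintro (hx | hx)
            · obtain ⟨j, hj, rfl, hrj⟩ := (hmem x).mp hx
              exact ⟨j, hj, rfl, by rw [hrootget j hj, if_pos hrj, hrpy]⟩
            · obtain ⟨j, hj, rfl, hrj⟩ := (hW7 py hpyn x).mp hx
              exact ⟨j, hj, rfl, by rw [hrootget j hj, if_neg (by rw [hrj]; exact_mod_cast fun hh => hne' (by omega)), hrj, hrpy]⟩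
          · rintro ⟨j, hj, rfl, hrj⟩
            rw [hrootget j hj] at hrj
            by_cases hRj : R.getD j 0 = (px : Int)
            · exact Or.inl ((hmem _).mpr ⟨j, hj, rfl, hRj⟩)
            · rw [if_neg hRj] at hrj
              right
              exact (hW7 py hpyn _).mpr ⟨j, hj, rfl, by rw [hrj, hrpy]⟩
        · rw [if_neg (by tauto)]
          rw [hW7 r hr x]
          constructor
          · rintro ⟨j, hj, rfl, hrj⟩
            refine ⟨j, hj, rfl, ?_⟩
            rw [hrootget j hj, if_neg (by rw [hrj]; exact_mod_cast fun hh => hrpx (by omega)), hrj]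
          · rintro ⟨j, hj, rfl, hrj⟩
            rw [hrootget j hj] at hrj
            by_cases hRj : R.getD j 0 = (px : Int)
            · rw [if_pos hRj] at hrj
              exact absurd (by omega : py = r) hrpy
            · rw [if_neg hRj] at hrj
              exact ⟨j, hj, rfl, hrj⟩
    · have := pvReps_relabel n R (List.foldl (fun r x => pvASet r x ra) R mrm)
        px py hpxn hRpx hRpy hne' hrootget
      omega

theorem pvBStep_eq (st : Array Int × Array (List Int)) (q : Int × Int) :
    (let rm := pvAGet st.1 q.1 0
     let ra := pvAGet st.1 q.2 0
     if rm ≠ ra then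
       let mrm := pvAGet st.2 rm []
       (mrm.foldl (fun r x => pvASet r x ra) st.1,
        pvASet (pvASet st.2 ra (mrm ++ pvAGet st.2 ra [])) rm [])
     else st) = pvBStep st.1 st.2 q.1 q.2 := by
  cases st
  rfl

theorem pvFold_links (num : Int) (n : Nat) (hnum : (n : Int) = num) :
    ∀ (L : List (Int × Int)) (P R : Array Int) (M : Array (List Int)) (k : Nat),
      pvInv n k P R M →
      (∀ q ∈ L, -num ≤ q.1 ∧ q.1 < num ∧ -num ≤ q.2 ∧ q.2 < num) →
      ∃ k', pvInv n k'
        (L.foldl (fun p q => pvUnionA p q.1 q.2) P)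
        (L.foldl (fun st q => pvBStep st.1 st.2 q.1 q.2) (R, M)).1
        (L.foldl (fun st q => pvBStep st.1 st.2 q.1 q.2) (R, M)).2 := by
  intro L
  induction L with
  | nil => intro P R M k I _; exact ⟨k, I⟩
  | cons q t ih =>
    intro P R M k I hb
    obtain ⟨hq1, hq2, hq3, hq4⟩ := hb q (by simp)
    obtain ⟨k1, I1⟩ := pvStep_spec num n hnum P R M k I q.1 q.2 hq1 hq2 hq3 hq4
    simp only [List.foldl_cons]
    have := ih (pvUnionA P q.1 q.2) (pvBStep R M q.1 q.2).1 (pvBStep R M q.1 q.2).2 k1 I1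
      (fun q' hq' => hb q' (by simp [hq']))
    simpa using this

theorem pvGroup (num : Int) (n : Nat) (hnum : (n : Int) = num) (R : Array Int) :
    ∀ (is : List Int) (P : Array Int) (bk : Array (List Int)) (od : List Int) (k : Nat),
      pvGood n k P R → k ≤ n →
      (∀ i ∈ is, 0 ≤ i ∧ i < num) →
      (is.foldl
        (fun (st : Array Int × Array (List Int) × List Int) i =>
          let fr := pvFindA (st.1.size + 1) st.1 i
          let b := pvAGet st.2.1 fr.2 []
          (fr.1, pvASet st.2.1 fr.2 (i :: b), if b.isEmpty then fr.2 :: st.2.2 else st.2.2))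
        (P, bk, od)).2
      = is.foldl
        (fun (d : Array (List Int) × List Int) i =>
          let r := pvAGet R i 0
          let b := pvAGet d.1 r []
          (pvASet d.1 r (i :: b), if b.isEmpty then r :: d.2 else d.2))
        (bk, od) := by
  intro is
  induction is with
  | nil => intro P bk od k _ _ _; rfl
  | cons i t ih =>
    intro P bk od k G hk hb
    obtain ⟨hi0, hin⟩ := hb i (by simp)
    obtain ⟨hPl, hRl, hPr, hRr, hW3, hW4, hW6, hW8, hW5⟩ := G
    have hci : pvCI num i = i := by unfold pvCI; rw [if_neg (by omega)]
    have hiN : i.toNat < n := by omega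
    have hpre : pvIroot n P (pvCI num i) = R.getD (pvCI num i).toNat 0 := by
      rw [hci]
      have := pvIroot_stable P (R.getD i.toNat 0) (hW8 i.toNat hiN) k ((i.toNat : Nat) : Int)
        (hW5 i.toNat hiN) n hk
      rwa [Int.toNat_of_nonneg hi0] at this
    have hf := pvFindA_spec num n k hnum n P R i
      ⟨hPl, hRl, hPr, hRr, hW3, hW4, hW6, hW8, hW5⟩ (by omega) hin hpre
    obtain ⟨hfv, hfG⟩ := hf
    rw [hci] at hfv
    have hfuel : P.size + 1 = n + 1 := by rw [hPl]
    have hread : pvAGet R i 0 = R.getD i.toNat 0 := pvAGet_of_nonneg R 0 hi0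
    simp only [List.foldl_cons]
    rw [hfuel]
    rw [ih (pvFindA (n+1) P i).1 _ _ k hfG hk (fun i' hi' => hb i' (by simp [hi']))]
    rw [hfv, hread]

theorem pvRange_getD (num : Int) (n : Nat) (hnum : (n : Int) = num) (j : Nat) (hj : j < n) :
    (PySem.List.pyRange 0 num 1).getD j 0 = (j : Int) := by
  have hlen : (PySem.List.pyRange 0 num 1).length = n := by
    rw [PySem.List.length_pyRange_one]; omega
  rw [List.getD_eq_getElem?_getD, List.getElem?_eq_getElem (by omega), Option.getD_some,
    PySem.List.getElem_pyRange_one]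
  omega

theorem pvInit (num : Int) (n : Nat) (hnum : (n : Int) = num) :
    pvInv n 0 (PySem.List.pyRange 0 num 1).toArray (PySem.List.pyRange 0 num 1).toArray
      ((PySem.List.pyRange 0 num 1).map (fun i => [i])).toArray := by
  have hlenL : (PySem.List.pyRange 0 num 1).length = n := by
    rw [PySem.List.length_pyRange_one]; omega
  have hlen : (PySem.List.pyRange 0 num 1).toArray.size = n := by
    rw [List.size_toArray, hlenL]
  have hget : ∀ j, j < n → (PySem.List.pyRange 0 num 1).toArray.getD j 0 = (j : Int) := by
    intro j hj
    rw [pvAGetD_toArray]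
    exact pvRange_getD num n hnum j hj
  refine ⟨⟨hlen, hlen, ?_, ?_, ?_, ?_, ?_, ?_, ?_⟩, by simp [hlenL], ?_, ?_⟩
  · intro j hj; rw [hget j hj]; constructor <;> omega
  · intro j hj; rw [hget j hj]; constructor <;> omega
  · intro j hj; rw [hget j hj]; simp only [Int.toNat_natCast]; rw [hget j hj]
  · intro j hj _; exact hget j hj
  · intro j hj; rw [hget j hj]; simp only [Int.toNat_natCast]; rw [hget j hj]
  · intro j hj; rw [hget j hj]; simp only [Int.toNat_natCast]; rw [hget j hj]
  · intro j hj; simp only [pvIroot]; exact (hget j hj).symm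
  · intro r hr x
    have hrlen : r < ((PySem.List.pyRange 0 num 1)).length := by omega
    rw [pvAGetD_toArray, List.getD_eq_getElem?_getD, List.getElem?_map,
      List.getElem?_eq_getElem hrlen]
    simp only [Option.map_some, Option.getD_some, List.mem_singleton,
      PySem.List.getElem_pyRange_one]
    constructor
    · rintro rfl
      exact ⟨r, hr, by omega, by rw [hget r hr]⟩
    · rintro ⟨j, hj, rfl, hR⟩
      rw [hget j hj] at hR
      omega
  · have heq : (Finset.range n).filter
        (fun j => (PySem.List.pyRange 0 num 1).toArray.getD j 0 = (j : Int)) = Finset.range n := by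
      apply Finset.filter_true_of_mem
      intro j hj
      exact hget j (Finset.mem_range.mp hj)
    have h2 : pvReps n (PySem.List.pyRange 0 num 1).toArray = n := by
      unfold pvReps
      rw [heq]
      exact Finset.card_range n
    omega

theorem pv_main : ∀ (antecedent_links : List (Int × Int)) (num_mentions : Int),
    Pre_union_find_clustering_py antecedent_links num_mentions →
    union_find_clustering_py antecedent_links num_mentions =
    union_find_clustering_py_alt antecedent_links num_mentions := by
  intro links num hpre
  by_cases hn : num ≤ 0
  · have hL : pvLinksItems links = [] := by
      rw [List.eq_nil_iff_forall_not_mem]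
      intro q hq
      obtain ⟨a1, a2, _, _⟩ := hpre q hq
      omega
    rw [union_find_clustering_py, union_find_clustering_py_alt]
    simp only [hL, List.foldl_nil, PySem.List.pyRange_one_eq_nil hn]
  · set n := num.toNat with hndef
    have hnum : (n : Int) = num := by omega
    obtain ⟨kf, If⟩ := pvFold_links num n hnum (pvLinksItems links)
      (PySem.List.pyRange 0 num 1).toArray (PySem.List.pyRange 0 num 1).toArray
      ((PySem.List.pyRange 0 num 1).map (fun i => [i])).toArray 0 (pvInit num n hnum) hpre
    obtain ⟨Gf, _, _, hcnt⟩ := If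
    rw [union_find_clustering_py, union_find_clustering_py_alt]
    simp only []
    -- B's link fold is the pvBStep fold
    have hBsame : (pvLinksItems links).foldl
        (fun (st : Array Int × Array (List Int)) q =>
          let rm := pvAGet st.1 q.1 0
          let ra := pvAGet st.1 q.2 0
          if rm ≠ ra then
            let mrm := pvAGet st.2 rm []
            (mrm.foldl (fun r x => pvASet r x ra) st.1,
             pvASet (pvASet st.2 ra (mrm ++ pvAGet st.2 ra [])) rm [])
          else st)
        ((PySem.List.pyRange 0 num 1).toArray,
         ((PySem.List.pyRange 0 num 1).map (fun i => [i])).toArray)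
        = (pvLinksItems links).foldl (fun st q => pvBStep st.1 st.2 q.1 q.2)
            ((PySem.List.pyRange 0 num 1).toArray,
             ((PySem.List.pyRange 0 num 1).map (fun i => [i])).toArray) := by
      apply PySem.List.foldl_congr_mem
      intro acc x _
      exact pvBStep_eq acc x
    rw [hBsame]
    have hgr := pvGroup num n hnum
      ((pvLinksItems links).foldl (fun st q => pvBStep st.1 st.2 q.1 q.2)
        ((PySem.List.pyRange 0 num 1).toArray,
         ((PySem.List.pyRange 0 num 1).map (fun i => [i])).toArray)).1
      (PySem.List.pyRange 0 num 1)
      ((pvLinksItems links).foldl (fun p q => pvUnionA p q.1 q.2) (PySem.List.pyRange 0 num 1).toArray)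
      (Array.replicate num.toNat ([] : List Int)) ([] : List Int) kf Gf (by omega)
      (fun i hi => by
        have := (PySem.List.mem_pyRange_one).mp hi
        exact ⟨this.1, this.2⟩)
    rw [hgr]
-- ===== VERDICT (by name: the statement is the Claim_ definition above) =====
theorem union_find_clustering_py_spec : Claim_equal_union_find_clustering_py := by
  intro antecedent_links num_mentions _ hpre
  exact pv_main antecedent_links num_mentions hpre
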